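-- pv_equiv track=rewrite | github.com/sidnb13/euler | code/116.py | count_master_116
-- ===== SOURCE A (Python) =====
-- def count_master_116(units, block_size):
--     cache = [0] * (units + 1)
--     def count_ways(spaces, block_size):
--         if block_size > spaces:
--             return 0
--         if cache[spaces]:
--             return cache[spaces]
--         res = 0
--         for offset in range(0, spaces - block_size + 1):
--             # possible offsets are remaining spaces after inserting 1 block (so add 1)
--             res += count_ways(spaces - block_size - offset, block_size) + 1 # we insert one more block and apply the offset
--         cache[spaces] = res
--         return res
--     ans = count_ways(units, block_size)
--     del cache
--     return ans
-- ===== SOURCE B (Python) =====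
-- def count_master_116(units, block_size):
--     # Closed form f(s) = s - block_size + 1 below 2*block_size, then the two-term
--     # recurrence f(s) = f(s-1) + f(s-block_size) + 1, storing only computed values.
--     b = block_size
--     if units < b:
--         return 0
--     if units < 2 * b:
--         return units - b + 1
--     vals = []          # vals[i] = f(2*b + i)
--     prev = b           # f(2*b - 1)
--     for s in range(2 * b, units + 1):
--         j = s - b
--         fj = (j - b + 1) if j < 2 * b else vals[j - 2 * b]
--         prev = prev + fj + 1
--         vals.append(prev)
--     return prev
-- ===== Notes on version B (the rewrite author's own statement) =====
-- stated objective: faster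
-- what changed: Replaced the memoized recursion with its inner offset-summation loop by a bottom-up two-term recurrence f(s)=f(s-1)+f(s-b)+1, with the closed form s-b+1 below 2b so only states from 2b up are tabulated.
-- outside the precondition, e.g. on count_master_116(3, -1): A raises IndexError, B raises IndexError; on count_master_116(3, 0): A raises RecursionError, B raises IndexError
import Mathlib
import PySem

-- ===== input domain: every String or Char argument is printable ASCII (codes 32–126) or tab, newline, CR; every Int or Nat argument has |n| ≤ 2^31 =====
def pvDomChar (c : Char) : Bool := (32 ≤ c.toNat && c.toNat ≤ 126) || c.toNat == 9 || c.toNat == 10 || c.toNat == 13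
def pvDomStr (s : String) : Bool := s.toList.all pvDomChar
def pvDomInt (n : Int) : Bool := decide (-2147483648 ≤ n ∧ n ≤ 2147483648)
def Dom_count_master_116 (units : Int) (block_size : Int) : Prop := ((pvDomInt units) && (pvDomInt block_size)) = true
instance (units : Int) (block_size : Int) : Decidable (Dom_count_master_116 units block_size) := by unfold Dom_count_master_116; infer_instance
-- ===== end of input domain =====

-- B replaces A's memoized recursion (inner offset-summation loop per state) by a bottom-up
-- two-term recurrence f(s) = f(s-1) + f(s-b) + 1 starting from the closed form below 2b;
-- measured faster in a timing run; equal on Pre_ (block_size ≥ 1, or block_size > units).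

-- ===== PORT A =====
-- count_ways, transliterated: the memo list `cache` is threaded through; fuel only makes
-- the recursion total (never exhausted under Pre_); cache reads use pyGetD 0 and the write
-- uses List.set — exact for the nonnegative indices reached under Pre_.
def cwA (b : Int) : Nat → Int → List Int → Int × List Int
  | 0, _, cache => (0, cache)
  | Nat.succ fuel, spaces, cache =>
    if b > spaces then (0, cache)
    else
      let cv := PySem.List.pyGetD cache spaces 0
      if cv ≠ 0 then (cv, cache)
      else
        let rc := (PySem.List.pyRange 0 (spaces - b + 1) 1).foldl
          (fun (acc : Int × List Int) offset =>
            let pr := cwA b fuel (spaces - b - offset) acc.2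
            (acc.1 + (pr.1 + 1), pr.2)) ((0 : Int), cache)
        (rc.1, rc.2.set spaces.toNat rc.1)

def count_master_116 (units : Int) (block_size : Int) : Int :=
  let cache := List.replicate (units + 1).toNat 0
  (cwA block_size (units.toNat + 2) units cache).1

-- ===== PORT B =====
def count_master_116_alt (units : Int) (block_size : Int) : Int :=
  if units < block_size then 0
  else if units < 2 * block_size then units - block_size + 1
  else
    ((PySem.List.pyRange (2 * block_size) (units + 1) 1).foldl
      (fun (acc : List Int × Int) s =>
        let j := s - block_size
        let fj := if j < 2 * block_size then j - block_size + 1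
                  else PySem.List.pyGetD acc.1 (j - 2 * block_size) 0
        let prev := acc.2 + fj + 1
        (acc.1 ++ [prev], prev)) ([], block_size)).2

-- ===== PRECONDITION & SPEC =====
-- Pre_ excludes exactly the inputs where A raises: block_size ≤ 0 together with
-- block_size ≤ units (IndexError from a negative cache index, or RecursionError at block_size = 0).
def Pre_count_master_116 (units : Int) (block_size : Int) : Prop :=
  1 ≤ block_size ∨ units < block_size
instance (units : Int) (block_size : Int) : Decidable (Pre_count_master_116 units block_size) := by unfold Pre_count_master_116; infer_instance

def pvWitness_count_master_116 : Int × Int := (7, 3)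

def Spec_count_master_116 (units : Int) (block_size : Int) (out : Int) : Prop := out = count_master_116_alt units block_size
instance (units : Int) (block_size : Int) (out : Int) : Decidable (Spec_count_master_116 units block_size out) := by unfold Spec_count_master_116; infer_instance

-- ===== CLAIM (what is proved, stated in full; the proofs are below) =====
def Claim_equal_count_master_116 : Prop := ∀ (units : Int) (block_size : Int), Dom_count_master_116 units block_size → Pre_count_master_116 units block_size → Spec_count_master_116 units block_size (count_master_116 units block_size)

-- ===== LEMMAS AND PROOFS =====

-- The mathematical value both programs compute: for b ≥ 1,
-- g b s = 0 if s < b, else (s - b + 1) + Σ_{j ≤ s-b} g b j.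
def g (b : Int) (s : Nat) : Int :=
  if h : 1 ≤ b ∧ b ≤ (s : Int) then
    ((s : Int) - b + 1) + (((List.range (s + 1 - b.toNat)).attach).map (fun j => g b j.1)).sum
  else 0
termination_by s
decreasing_by
  have hj := j.2
  simp only [List.mem_range] at hj
  omega

lemma g_eq (b : Int) (s : Nat) :
    g b s = if 1 ≤ b ∧ b ≤ (s : Int) then
      ((s : Int) - b + 1) + ((List.range (s + 1 - b.toNat)).map (g b)).sum
    else 0 := by
  rw [g]
  split_ifs with h
  · simp
  · rfl

lemma g_of_lt (b : Int) (s : Nat) (h : (s : Int) < b) : g b s = 0 := by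
  rw [g_eq]; rw [if_neg]; omega

lemma sum_map_range (f : Nat → Int) (n : Nat) :
    ((List.range n).map f).sum = ∑ i ∈ Finset.range n, f i := by
  induction n with
  | zero => simp
  | succ k ih => rw [List.range_succ, Finset.sum_range_succ]; simp [ih]

-- Prefix sums of g.
def Ssum (b : Int) (i : Nat) : Int := ((List.range (i + 1)).map (g b)).sum

lemma g_of_ge (b : Int) (s : Nat) (hb : 1 ≤ b) (h : b ≤ (s : Int)) :
    g b s = ((s : Int) - b + 1) + Ssum b (s - b.toNat) := by
  rw [g_eq, if_pos ⟨hb, h⟩, Ssum]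
  have : s + 1 - b.toNat = s - b.toNat + 1 := by omega
  rw [this]

-- ---- further facts about g ----

lemma Ssum_zero (b : Int) (m : Nat) (hm : (m : Int) < b) : Ssum b m = 0 := by
  apply List.sum_eq_zero
  intro x hx
  simp only [List.mem_map, List.mem_range] at hx
  obtain ⟨k, hk, rfl⟩ := hx
  exact g_of_lt b k (by omega)

lemma Ssum_succ (b : Int) (m : Nat) : Ssum b (m + 1) = Ssum b m + g b (m + 1) := by
  unfold Ssum
  rw [List.range_succ (n := m + 1), List.map_append, List.sum_append]
  simp

lemma g_lin (b : Int) (hb : 1 ≤ b) (s : Nat) (h1 : b ≤ (s : Int)) (h2 : (s : Int) < 2 * b) :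
    g b s = (s : Int) - b + 1 := by
  rw [g_of_ge b s hb h1, Ssum_zero b _ (by omega)]
  ring

lemma g_rec (b : Int) (hb : 1 ≤ b) (s : Nat) (h : b ≤ (s : Int)) :
    g b s = g b (s - 1) + g b (s - b.toNat) + 1 := by
  by_cases heq : (s : Int) = b
  · rw [g_lin b hb s h (by omega), g_of_lt b (s - 1) (by omega), g_of_lt b (s - b.toNat) (by omega)]
    omega
  · have hlt : b < (s : Int) := by omega
    have hs1 : b ≤ ((s - 1 : Nat) : Int) := by omega
    rw [g_of_ge b s hb h, g_of_ge b (s - 1) hb hs1]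
    have hm : s - b.toNat = (s - 1 - b.toNat) + 1 := by omega
    rw [hm, Ssum_succ]
    have : ((s - 1 : Nat) : Int) = (s : Int) - 1 := by omega
    rw [this]
    ring

-- ---- B side: the fold carries (computed values from 2b on, previous value). ----

lemma B_fold (b : Int) (hb : 1 ≤ b) (n : Nat) :
    ((PySem.List.pyRange (2 * b) (2 * b + (n : Int)) 1).foldl
      (fun (acc : List Int × Int) s =>
        let j := s - b
        let fj := if j < 2 * b then j - b + 1
                  else PySem.List.pyGetD acc.1 (j - 2 * b) 0
        let prev := acc.2 + fj + 1
        (acc.1 ++ [prev], prev)) ([], b))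
    = ((List.range n).map (fun i => g b ((2 * b).toNat + i)),
       g b ((2 * b).toNat + n - 1)) := by
  induction n with
  | zero =>
    rw [show (2 * b + ((0 : Nat) : Int)) = 2 * b by omega, PySem.List.pyRange_one_eq_nil le_rfl]
    simp only [List.foldl_nil, List.range_zero, List.map_nil]
    rw [g_lin b hb ((2 * b).toNat + 0 - 1) (by omega) (by omega), Prod.mk.injEq]
    exact ⟨rfl, by omega⟩
  | succ k ih =>
    have hsplit : PySem.List.pyRange (2 * b) (2 * b + ((k + 1 : Nat) : Int)) 1
        = PySem.List.pyRange (2 * b) (2 * b + (k : Int)) 1 ++ [2 * b + (k : Int)] := by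
      rw [show (2 * b + ((k + 1 : Nat) : Int)) = (2 * b + (k : Int)) + 1 by push_cast; ring]
      exact PySem.List.pyRange_one_succ_right (by omega)
    rw [hsplit, List.foldl_append, ih]
    simp only [List.foldl_cons, List.foldl_nil]
    have hfj : (if 2 * b + (k : Int) - b < 2 * b then 2 * b + (k : Int) - b - b + 1
               else PySem.List.pyGetD ((List.range k).map (fun i => g b ((2 * b).toNat + i)))
                 (2 * b + (k : Int) - b - 2 * b) 0)
              = g b (b.toNat + k) := by
      by_cases hk : (k : Int) < b
      · rw [if_pos (by omega), g_lin b hb (b.toNat + k) (by omega) (by omega)]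
        omega
      · rw [if_neg (by omega)]
        have h0 : (0 : Int) ≤ 2 * b + (k : Int) - b - 2 * b := by omega
        have h1 : 2 * b + (k : Int) - b - 2 * b
            < ((((List.range k).map (fun i => g b ((2 * b).toNat + i))).length : Nat) : Int) := by
          simp only [List.length_map, List.length_range]
          omega
        rw [PySem.List.pyGetD_eq_getElem _ _ h0 h1]
        simp only [List.getElem_map, List.getElem_range]
        congr 1
        omega
    rw [hfj]
    have hprev : g b ((2 * b).toNat + k - 1) + g b (b.toNat + k) + 1 = g b ((2 * b).toNat + k) := by
      have := g_rec b hb ((2 * b).toNat + k) (by omega)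
      rw [this, show (2 * b).toNat + k - b.toNat = b.toNat + k by omega]
    rw [hprev, Prod.mk.injEq]
    refine ⟨?_, ?_⟩
    · rw [List.range_succ, List.map_append]
      rfl
    · congr 1

-- ---- A side: memoization correctness. ----

def MemoInv (b : Int) (cache : List Int) : Prop :=
  ∀ i (h : i < cache.length), cache[i] ≠ 0 → cache[i] = g b i

lemma MemoInv_set (b : Int) (cache : List Int) (hI : MemoInv b cache) (k : Nat) (v : Int)
    (hv : v = g b k) : MemoInv b (cache.set k v) := by
  intro i hi hne
  rw [List.length_set] at hi
  by_cases hik : i = k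
  · subst hik
    rw [List.getElem_set_self (h := hi)] at hne ⊢
    exact hv
  · rw [List.getElem_set_ne (by omega)] at hne ⊢
    exact hI i hi hne

lemma cwA_correct (b : Int) (hb : 1 ≤ b) :
    ∀ fuel (spaces : Int) (cache : List Int), 0 ≤ spaces → spaces.toNat < fuel → MemoInv b cache →
      (cwA b fuel spaces cache).1 = g b spaces.toNat ∧ MemoInv b (cwA b fuel spaces cache).2 := by
  intro fuel
  induction fuel with
  | zero => intro spaces cache _ h _; omega
  | succ f ihf =>
    intro spaces cache hsp hfu hI
    by_cases hgt : b > spaces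
    · have : cwA b (f + 1) spaces cache = (0, cache) := by
        rw [cwA]; rw [if_pos hgt]
      rw [this]
      exact ⟨(g_of_lt b spaces.toNat (by omega)).symm, hI⟩
    · push_neg at hgt
      have hsp1 : 1 ≤ spaces := le_trans hb hgt
      rw [cwA]
      rw [if_neg (by omega)]
      simp only
      by_cases hcv : PySem.List.pyGetD cache spaces 0 ≠ 0
      · rw [if_pos hcv]
        refine ⟨?_, hI⟩
        have hin : spaces < (cache.length : Int) := by
          by_contra hlen
          push_neg at hlen
          have : PySem.List.pyGetD cache spaces 0 = 0 := by
            rw [PySem.List.pyGetD_of_nonneg _ _ hsp, List.getD_eq_getElem?_getD,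
              List.getElem?_eq_none (by omega)]
            rfl
          exact hcv this
        rw [PySem.List.pyGetD_eq_getElem _ _ hsp hin] at hcv ⊢
        have hin' : spaces.toNat < cache.length := by omega
        exact hI spaces.toNat hin' hcv
      · rw [if_neg hcv]
        -- the fold invariant
        have key : ∀ (l : List Int), (∀ o ∈ l, 0 ≤ o ∧ o ≤ spaces - b) →
            ∀ (r : Int) (c : List Int), MemoInv b c →
              (l.foldl (fun (acc : Int × List Int) offset =>
                  let pr := cwA b f (spaces - b - offset) acc.2
                  (acc.1 + (pr.1 + 1), pr.2)) (r, c)).1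
                = r + (l.map (fun o => g b (spaces - b - o).toNat + 1)).sum ∧
              MemoInv b (l.foldl (fun (acc : Int × List Int) offset =>
                  let pr := cwA b f (spaces - b - offset) acc.2
                  (acc.1 + (pr.1 + 1), pr.2)) (r, c)).2 := by
          intro l
          induction l with
          | nil =>
            intro _ r c hc
            simp only [List.foldl_nil, List.map_nil, List.sum_nil]
            exact ⟨by ring, hc⟩
          | cons o t iht =>
            intro hmem r c hc
            have ho := hmem o (by simp)
            have hrec := ihf (spaces - b - o) c (by omega) (by omega) hc
            simp only [List.foldl_cons]
            have := iht (fun x hx => hmem x (by simp [hx]))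
              (r + ((cwA b f (spaces - b - o) c).1 + 1)) ((cwA b f (spaces - b - o) c).2) hrec.2
            refine ⟨?_, this.2⟩
            rw [this.1, hrec.1]
            simp [List.sum_cons]
            ring
        have hmem : ∀ o ∈ PySem.List.pyRange 0 (spaces - b + 1) 1, 0 ≤ o ∧ o ≤ spaces - b := by
          intro o ho
          rw [PySem.List.mem_pyRange_one] at ho
          omega
        obtain ⟨hval, hinv⟩ := key _ hmem 0 cache hI
        set FR := (PySem.List.pyRange 0 (spaces - b + 1) 1).foldl
            (fun (acc : Int × List Int) offset =>
              let pr := cwA b f (spaces - b - offset) acc.2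
              (acc.1 + (pr.1 + 1), pr.2)) ((0 : Int), cache) with hFR
        -- evaluate the sum
        have hsum : FR.1 = g b spaces.toNat := by
          rw [hval]
          have hm : spaces - b + 1 = ((spaces - b).toNat + 1 : Nat) := by omega
          rw [hm, PySem.List.pyRange_one]
          simp only [zero_add, Int.sub_zero, Int.toNat_natCast, List.map_map]
          set m := (spaces - b).toNat with hmdef
          have hexp : ∀ k ∈ List.range (m + 1),
              ((fun o => g b (spaces - b - o).toNat + 1) ∘ fun k : Nat => (k : Int)) k
                = g b (m - k) + 1 := by
            intro k hk
            simp only [List.mem_range] at hk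
            simp only [Function.comp]
            congr 2
            omega
          rw [List.map_congr_left hexp, sum_map_range]
          have hrefl : ∑ k ∈ Finset.range (m + 1), (g b (m - k) + 1)
              = ∑ k ∈ Finset.range (m + 1), (g b k + 1) := by
            have := Finset.sum_range_reflect (fun k => g b k + 1) (m + 1)
            simpa using this
          rw [hrefl, Finset.sum_add_distrib, Finset.sum_const, ← sum_map_range (g b)]
          rw [g_of_ge b spaces.toNat hb (by omega), Ssum]
          have : spaces.toNat - b.toNat = m := by omega
          rw [this]
          simp
          omega
        refine ⟨hsum, ?_⟩
        exact MemoInv_set b FR.2 hinv spaces.toNat FR.1 hsum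

lemma MemoInv_replicate (b : Int) (n : Nat) : MemoInv b (List.replicate n 0) := by
  intro i hi hne
  simp at hne

-- ===== VERDICT (by name: the statement is the Claim_ definition above) =====
theorem count_master_116_spec : Claim_equal_count_master_116 := by
  intro units b _ hpre
  unfold Spec_count_master_116 count_master_116 count_master_116_alt
  by_cases hlt : units < b
  · rw [if_pos hlt]
    simp only
    rw [cwA]
    rw [if_pos (by omega)]
  · push_neg at hlt
    have hb : 1 ≤ b := by
      rcases hpre with h | h
      · exact h
      · omega
    have hu : 0 ≤ units := by omega
    rw [if_neg (by omega)]
    simp only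
    have hA := cwA_correct b hb (units.toNat + 2) units
        (List.replicate (units + 1).toNat 0) hu (by omega) (MemoInv_replicate b _)
    rw [hA.1]
    by_cases h2 : units < 2 * b
    · rw [if_pos h2, g_lin b hb units.toNat (by omega) (by omega)]
      omega
    · rw [if_neg h2]
      have hn : units + 1 = 2 * b + (((units + 1 - 2 * b).toNat : Nat) : Int) := by omega
      rw [hn, B_fold b hb (units + 1 - 2 * b).toNat]
      congr 1
      omega
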